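-- pv_equiv track=rewrite | github.com/wesleymesquita/Snippets | AQuestionADay/melt_histogram.py | melt_hist
-- ===== SOURCE A (Python) =====
-- def melt_hist(hist):
--     if len(hist) == 1 or len(hist) == 2:
--         return 1;
--     is_melt = False
--     count = 0
--     while not is_melt:
--         h = hist[:]
--         h[0]=0
--         for i in range(1,len(hist)-1):
--             k = min(min(hist[i-1], hist[i]), hist[i+1])
--             if k>0 and k == hist[i]:
--                 k=k-1
--             h[i]=k
--         h[len(h)-1] = 0
--         hist = h[:]
--         count = count + 1
--         if len([c for c in hist if c != 0])==0:
--             is_melt=True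
--     return count
--
--
--     return 0
-- ===== SOURCE B (Python) =====
-- def melt_hist(hist):
--     n = len(hist)
--     if n <= 2:
--         return 1
--     # forward pass: d[i] = min(i+1, min_{j<=i} (i-j+hist[j]))
--     d = []
--     left = 0
--     for v in hist:
--         left = min(left + 1, v)
--         d.append(left)
--     # backward pass folds in min(n-i, min_{j>=i} (j-i+hist[j])) and takes the max
--     right = 0
--     best = 0
--     for i in reversed(range(n)):
--         right = min(right + 1, hist[i])
--         best = max(best, min(d[i], right))
--     return max(best, 1)
-- ===== Notes on version B (the rewrite author's own statement) =====
-- stated objective: alternative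
-- what changed: A repeatedly sweeps the whole histogram with an erosion step until everything is zero and counts the sweeps; B runs no simulation at all: it computes the answer as a 1D distance transform, max(1, max_i min(i+1, n-i, min_j |i-j|+hist[j])), in two linear scans.
-- outside the precondition, e.g. on melt_hist([]): A raises IndexError, B returns 1
import Mathlib
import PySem

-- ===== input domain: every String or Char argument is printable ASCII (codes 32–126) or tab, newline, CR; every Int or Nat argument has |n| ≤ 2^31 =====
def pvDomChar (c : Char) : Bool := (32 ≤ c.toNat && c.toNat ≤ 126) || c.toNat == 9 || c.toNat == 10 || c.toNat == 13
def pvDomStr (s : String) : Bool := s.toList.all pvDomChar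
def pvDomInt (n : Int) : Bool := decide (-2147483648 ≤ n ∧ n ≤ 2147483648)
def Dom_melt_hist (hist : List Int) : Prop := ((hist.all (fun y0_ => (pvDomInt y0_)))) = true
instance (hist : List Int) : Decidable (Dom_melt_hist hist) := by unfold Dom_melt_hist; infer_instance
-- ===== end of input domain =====

-- B replaces A's repeated whole-array erosion sweeps (count the sweeps until all zero) with a
-- closed-form two-pass distance transform: answer = max(1, max_i min(i+1, n-i, min_j |i-j|+hist[j])).

-- ===== PORT A =====
-- the body of A's inner for-loop: k = min(min(hist[i-1], hist[i]), hist[i+1]); if k>0 and k==hist[i]: k=k-1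
def meltBody (hist : List Int) (i : Int) : Int :=
  let k := min (min (PySem.List.pyGetD hist (i - 1) 0) (PySem.List.pyGetD hist i 0))
               (PySem.List.pyGetD hist (i + 1) 0)   -- indices provably in range
  if 0 < k ∧ k = PySem.List.pyGetD hist i 0 then k - 1 else k

-- one erosion sweep: h = hist[:]; h[0]=0; interior update reads the ORIGINAL hist; h[-1]=0
def meltStep (hist : List Int) : List Int :=
  let h := PySem.List.pySetD hist 0 0            -- h[0] = 0 (IndexError on []: excluded by Pre_)
  let h := (PySem.List.pyRange 1 ((hist.length : Int) - 1) 1).foldl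
    (fun h i => PySem.List.pySetD h i (meltBody hist i)) h
  PySem.List.pySetD h ((h.length : Int) - 1) 0   -- h[len(h)-1] = 0

-- the while-loop; fuel bounds the iteration count (under Pre_ the loop provably stops within fuel)
def meltLoop : Nat → List Int → Int → Int
  | 0, _, count => count
  | fuel + 1, hist, count =>
    let hist := meltStep hist
    let count := count + 1
    if ((hist.filter (fun c => c ≠ 0)).length : Int) = 0 then count
    else meltLoop fuel hist count

def melt_hist (hist : List Int) : Int :=
  if (hist.length : Int) = 1 ∨ (hist.length : Int) = 2 then 1
  else meltLoop (hist.length + 1) hist 0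

-- ===== PORT B =====
def melt_hist_alt (hist : List Int) : Int :=
  let n : Int := hist.length
  if n ≤ 2 then 1
  else
    -- forward pass: d[i] = min(left+1, hist[i]) running from the left
    let dl := hist.foldl (fun (p : List Int × Int) v =>
        let left := min (p.2 + 1) v
        (p.1 ++ [left], left)) ([], 0)
    let d := dl.1
    -- backward pass: fold in the right distances, track the max
    let rb := ((List.range hist.length).reverse).foldl
        (fun (p : Int × Int) (i : Nat) =>
          let right := min (p.1 + 1) (PySem.List.pyGetD hist (i : Int) 0)
          (right, max p.2 (min (PySem.List.pyGetD d (i : Int) 0) right))) (0, 0)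
    max rb.2 1

-- ===== PRECONDITION & SPEC =====
-- Pre_ excludes [] (A raises IndexError at h[0]=0) and lists of length ≥ 3 with a negative
-- entry (the negative value can never erode to 0, so A's while-loop never terminates).
def Pre_melt_hist (hist : List Int) : Prop :=
  hist ≠ [] ∧ (hist.length ≤ 2 ∨ ∀ x ∈ hist, 0 ≤ x)
instance (hist : List Int) : Decidable (Pre_melt_hist hist) := by
  unfold Pre_melt_hist; infer_instance
def pvWitness_melt_hist : List Int := [1, 2, 1]

def Spec_melt_hist (hist : List Int) (out : Int) : Prop := out = melt_hist_alt hist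
instance (hist : List Int) (out : Int) : Decidable (Spec_melt_hist hist out) := by
  unfold Spec_melt_hist; infer_instance

-- ===== CLAIM (what is proved, stated in full; the proofs are below) =====
def Claim_equal_melt_hist : Prop :=
  ∀ (hist : List Int), Dom_melt_hist hist → Pre_melt_hist hist →
    Spec_melt_hist hist (melt_hist hist)

-- ===== LEMMAS AND PROOFS =====

-- melt time per position: Z v i = min(i+1, n-i, min_j dist(i,j)+v[j])
def pvTerm (v : List Int) (i j : Nat) : Int := (Nat.dist i j : Int) + v.getD j 0
def pvZ (v : List Int) (i : Nat) : Int :=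
  ((List.range v.length).map (pvTerm v i)).foldl min
    (min ((i : Int) + 1) ((v.length : Int) - (i : Int)))
def pvMaxZ (v : List Int) : Int := ((List.range v.length).map (pvZ v)).foldl max 0
def pvNN (v : List Int) : Prop := ∀ x ∈ v, 0 ≤ x
-- the mathematical form of one erosion sweep
def pvStepF (v : List Int) (i : Nat) : Int :=
  if i = 0 ∨ i = v.length - 1 then 0 else
    let k := min (min (v.getD (i - 1) 0) (v.getD i 0)) (v.getD (i + 1) 0)
    if 0 < k ∧ k = v.getD i 0 then k - 1 else k

-- generic fold-min helpers not provided by the libraries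
lemma pv_le_foldl_min {c a : Int} {l : List Int} (h1 : c ≤ a) (h2 : ∀ b ∈ l, c ≤ b) :
    c ≤ l.foldl min a := by
  induction l generalizing a with
  | nil => exact h1
  | cons x xs ih =>
    exact ih (le_min h1 (h2 x (by simp))) (fun b hb => h2 b (by simp [hb]))

lemma pv_foldl_min_add_one (l : List Int) (a : Int) :
    (l.map (· + 1)).foldl min (a + 1) = l.foldl min a + 1 := by
  induction l generalizing a with
  | nil => rfl
  | cons x xs ih =>
    have : min (a + 1) (x + 1) = min a x + 1 := min_add_add_right a x 1
    simp only [List.map_cons, List.foldl_cons, this, ih (min a x)]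

lemma pv_foldl_min_min (l : List Int) (a b : Int) :
    l.foldl min (min a b) = min (l.foldl min a) b := by
  induction l generalizing a with
  | nil => rfl
  | cons x xs ih => simpa [min_right_comm a b x] using ih (min a x)

-- ----- step bridges: meltStep computes pvStepF -----
lemma pv_fold_set_length (F : Int → Int) (l : List Int) (h : List Int) :
    (l.foldl (fun h i => PySem.List.pySetD h i (F i)) h).length = h.length := by
  induction l generalizing h <;> simp [*, PySem.List.length_pySetD]

lemma pv_meltStep_length (v : List Int) : (meltStep v).length = v.length := by
  unfold meltStep
  simp only [pv_fold_set_length, PySem.List.length_pySetD]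

lemma pv_getD_set (xs : List Int) (n p : Nat) (v d : Int) (h : n < xs.length)
    (hp : p < xs.length) :
    (xs.set n v).getD p d = if p = n then v else xs.getD p d := by
  rcases eq_or_ne p n with rfl | hne
  · simp [List.getD_eq_getElem _ _ (by simpa using hp), List.getElem_set, h]
  · simp [List.getD_eq_getElem _ _ (by simpa using hp), List.getElem_set, hne, Ne.symm hne,
      List.getD_eq_getElem _ _ hp]

-- the fold writes F at indices 1..m-1 and touches nothing else
lemma pv_fold_set_getD (F : Int → Int) (m : Nat) (h : List Int) (p : Nat)
    (hp : p < h.length) (hm : m ≤ h.length) :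
    ((PySem.List.pyRange 1 (m : Int) 1).foldl
        (fun h i => PySem.List.pySetD h i (F i)) h).getD p 0
      = if 1 ≤ p ∧ p < m then F (p : Int) else h.getD p 0 := by
  induction m with
  | zero =>
    simp [PySem.List.pyRange_one]
  | succ m ih =>
    rcases Nat.eq_zero_or_pos m with rfl | hmpos
    · simp [PySem.List.pyRange_one]
      intro h1 h2; omega
    · have hcast : ((m + 1 : Nat) : Int) = (m : Int) + 1 := by push_cast; ring
      rw [hcast, PySem.List.pyRange_one_succ_right (by exact_mod_cast hmpos), List.foldl_append]
      simp only [List.foldl_cons, List.foldl_nil]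
      have hm' : m ≤ h.length := by omega
      have hlen : ((PySem.List.pyRange 1 (m : Int) 1).foldl
          (fun h i => PySem.List.pySetD h i (F i)) h).length = h.length :=
        pv_fold_set_length F _ h
      rw [show ((m : Int)) = ((m : Nat) : Int) from rfl, PySem.List.pySetD_natCast,
        pv_getD_set _ _ _ _ _ (by omega) (by omega), ih hm']
      rcases eq_or_ne p m with rfl | hne
      · simp; omega
      · simp [hne]; omega

lemma pv_meltStep_getD (v : List Int) (hn : 3 ≤ v.length) (p : Nat) (hp : p < v.length) :
    (meltStep v).getD p 0 = pvStepF v p := by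
  have h00 : PySem.List.pySetD v 0 0 = v.set 0 0 := by
    rw [show (0 : Int) = ((0 : Nat) : Int) from rfl, PySem.List.pySetD_natCast]
  have hfl : ((PySem.List.pyRange 1 ((v.length : Int) - 1) 1).foldl
      (fun h i => PySem.List.pySetD h i (meltBody v i)) (v.set 0 0)).length = v.length := by
    rw [pv_fold_set_length]; simp
  have hstep0 : meltStep v = PySem.List.pySetD
      ((PySem.List.pyRange 1 ((v.length : Int) - 1) 1).foldl
        (fun h i => PySem.List.pySetD h i (meltBody v i)) (PySem.List.pySetD v 0 0))
      ((((PySem.List.pyRange 1 ((v.length : Int) - 1) 1).foldl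
        (fun h i => PySem.List.pySetD h i (meltBody v i)) (PySem.List.pySetD v 0 0)).length : Int) - 1) 0 := rfl
  rw [h00] at hstep0
  rw [hstep0, hfl, show ((v.length : Int) - 1) = ((v.length - 1 : Nat) : Int) by omega,
    PySem.List.pySetD_natCast,
    pv_getD_set _ _ _ _ _ (by rw [pv_fold_set_length]; simp; try omega)
      (by rw [pv_fold_set_length]; simpa using hp),
    pv_fold_set_getD _ _ _ _ (by simpa using hp) (by simp),
    pv_getD_set _ _ _ _ _ (by omega) hp]
  unfold pvStepF meltBody
  rcases eq_or_ne p (v.length - 1) with rfl | hlast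
  · simp
  · rcases Nat.eq_zero_or_pos p with rfl | hppos
    · simp
    · have hc1 : ((p : Int) - 1) = ((p - 1 : Nat) : Int) := by omega
      have hc2 : ((p : Int) + 1) = ((p + 1 : Nat) : Int) := by omega
      simp only [if_neg (by omega : ¬ p = v.length - 1), if_neg (by omega : ¬ (p = 0 ∨ p = v.length - 1)),
        if_pos (by omega : 1 ≤ p ∧ p < v.length - 1), hc1, hc2, PySem.List.pyGetD_natCast]

lemma pv_getD_nonneg (v : List Int) (hv : pvNN v) (j : Nat) (hj : j < v.length) :
    0 ≤ v.getD j 0 := by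
  rw [List.getD_eq_getElem _ _ hj]
  exact hv _ (List.getElem_mem hj)

lemma pvStepF_interior (v : List Int) (p : Nat) (hb : ¬ (p = 0 ∨ p = v.length - 1)) :
    pvStepF v p =
      if 0 < min (min (v.getD (p - 1) 0) (v.getD p 0)) (v.getD (p + 1) 0) ∧
          min (min (v.getD (p - 1) 0) (v.getD p 0)) (v.getD (p + 1) 0) = v.getD p 0
        then min (min (v.getD (p - 1) 0) (v.getD p 0)) (v.getD (p + 1) 0) - 1
        else min (min (v.getD (p - 1) 0) (v.getD p 0)) (v.getD (p + 1) 0) := by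
  simp [pvStepF, hb]

lemma pv_stepF_nonneg (v : List Int) (hv : pvNN v) (p : Nat) (hp : p < v.length) :
    0 ≤ pvStepF v p := by
  by_cases hb : p = 0 ∨ p = v.length - 1
  · simp [pvStepF, hb]
  · have hp0 : p ≠ 0 := fun h => hb (Or.inl h)
    have hpl : p ≠ v.length - 1 := fun h => hb (Or.inr h)
    have h1 := pv_getD_nonneg v hv (p - 1) (by omega)
    have h2 := pv_getD_nonneg v hv p hp
    have h3 := pv_getD_nonneg v hv (p + 1) (by omega)
    rw [pvStepF_interior v p hb]
    have hm : 0 ≤ min (min (v.getD (p - 1) 0) (v.getD p 0)) (v.getD (p + 1) 0) :=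
      le_min (le_min h1 h2) h3
    split_ifs with hc
    · omega
    · exact hm

lemma pv_meltStep_nonneg (v : List Int) (hv : pvNN v) (hn : 3 ≤ v.length) :
    pvNN (meltStep v) := by
  intro x hx
  obtain ⟨i, hi, rfl⟩ := List.mem_iff_getElem.mp hx
  have hlen : i < v.length := by rw [← pv_meltStep_length v]; exact hi
  rw [← List.getD_eq_getElem _ 0 hi, pv_meltStep_getD v hn i hlen]
  exact pv_stepF_nonneg v hv i hlen

-- ----- basic Z facts -----
lemma pvZ_nonneg (v : List Int) (hv : pvNN v) (i : Nat) (hi : i < v.length) : 0 ≤ pvZ v i := by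
  apply pv_le_foldl_min
  · apply le_min <;> omega
  · intro b hb
    obtain ⟨j, hj, rfl⟩ := List.mem_map.mp hb
    have hj' := List.mem_range.mp hj
    have := pv_getD_nonneg v hv j hj'
    unfold pvTerm
    positivity

lemma pvZ_le_init (v : List Int) (i : Nat) :
    pvZ v i ≤ min ((i : Int) + 1) ((v.length : Int) - (i : Int)) :=
  (PySem.List.foldl_min_le _ _).1

lemma pvZ_le_term (v : List Int) (i j : Nat) (hj : j < v.length) : pvZ v i ≤ pvTerm v i j :=
  (PySem.List.foldl_min_le _ _).2 _ (List.mem_map_of_mem (List.mem_range.mpr hj))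

lemma pvZ_eq_zero_iff (v : List Int) (hv : pvNN v) (i : Nat) (hi : i < v.length) :
    pvZ v i = 0 ↔ v.getD i 0 = 0 := by
  constructor
  · intro h0
    rw [pvZ] at h0
    rcases PySem.List.foldl_min_mem
        ((List.range v.length).map (pvTerm v i))
        (min ((i : Int) + 1) ((v.length : Int) - (i : Int))) with hc | hc <;> rw [h0] at hc
    · exfalso
      have h1 : min ((i : Int) + 1) ((v.length : Int) - (i : Int)) = 0 := hc.symm
      simp only [min_eq_iff] at h1
      omega
    · obtain ⟨j, hj, hjeq⟩ := List.mem_map.mp hc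
      have hj' := List.mem_range.mp hj
      have hd := pv_getD_nonneg v hv j hj'
      unfold pvTerm at hjeq
      have hdist : Nat.dist i j = 0 ∧ v.getD j 0 = 0 := by omega
      have : i = j := Nat.eq_of_dist_eq_zero hdist.1
      rw [this]; exact hdist.2
  · intro h0
    refine le_antisymm ?_ (pvZ_nonneg v hv i hi)
    calc pvZ v i ≤ pvTerm v i i := pvZ_le_term v i i hi
      _ = 0 := by unfold pvTerm; rw [Nat.dist_eq_zero rfl]; simpa using h0

-- ----- the core decay lemma: one sweep subtracts 1 from every Z (floored at 0) -----
lemma pvZw (v : List Int) (hn : 3 ≤ v.length) (i : Nat) :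
    pvZ (meltStep v) i =
      ((List.range v.length).map (fun j => (Nat.dist i j : Int) + pvStepF v j)).foldl min
        (min ((i : Int) + 1) ((v.length : Int) - (i : Int))) := by
  have hmap : (List.range (meltStep v).length).map (pvTerm (meltStep v) i)
      = (List.range v.length).map (fun j => (Nat.dist i j : Int) + pvStepF v j) := by
    rw [pv_meltStep_length]
    apply List.map_congr_left
    intro j hj
    unfold pvTerm
    rw [pv_meltStep_getD v hn j (List.mem_range.mp hj)]
  rw [pvZ, hmap, pv_meltStep_length]

lemma pv_stepF_boundary (v : List Int) (j : Nat) (hb : j = 0 ∨ j = v.length - 1) :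
    pvStepF v j = 0 := by
  simp [pvStepF, hb]

lemma pvZ_step_ge (v : List Int) (hv : pvNN v) (hn : 3 ≤ v.length) (i : Nat)
    (hi : i < v.length) : max 0 (pvZ v i - 1) ≤ pvZ (meltStep v) i := by
  rw [pvZw v hn i]
  have hinit := pvZ_le_init v i
  apply pv_le_foldl_min
  · simp only [le_min_iff] at hinit ⊢
    omega
  · intro b hb
    obtain ⟨j, hj, rfl⟩ := List.mem_map.mp hb
    show max 0 (pvZ v i - 1) ≤ (Nat.dist i j : Int) + pvStepF v j
    have hj' := List.mem_range.mp hj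
    have hnn := pv_stepF_nonneg v hv j hj'
    by_cases hb0 : j = 0 ∨ j = v.length - 1
    · rw [pv_stepF_boundary v j hb0]
      have hd : Nat.dist i j + 1 = i + 1 ∨ (j = v.length - 1 ∧ Nat.dist i j + 1 = v.length - i) := by
        rcases hb0 with rfl | rfl
        · left; simp only [Nat.dist]; omega
        · exact Or.inr ⟨rfl, by simp only [Nat.dist]; omega⟩
      simp only [le_min_iff] at hinit
      rcases hd with hd | ⟨_, hd⟩ <;> omega
    · have hj0 : j ≠ 0 := fun h => hb0 (Or.inl h)
      have hjl : j ≠ v.length - 1 := fun h => hb0 (Or.inr h)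
      have ht0 := pvZ_le_term v i j hj'
      have htm := pvZ_le_term v i (j - 1) (by omega)
      have htp := pvZ_le_term v i (j + 1) (by omega)
      unfold pvTerm at ht0 htm htp
      have hdm : Nat.dist i (j - 1) ≤ Nat.dist i j + 1 ∧ Nat.dist i j ≤ Nat.dist i (j - 1) + 1 := by
        simp [Nat.dist]; omega
      have hdp : Nat.dist i (j + 1) ≤ Nat.dist i j + 1 ∧ Nat.dist i j ≤ Nat.dist i (j + 1) + 1 := by
        simp [Nat.dist]; omega
      rw [pvStepF_interior v j hb0]
      have ha0 := pv_getD_nonneg v hv (j - 1) (by omega)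
      have hb0' := pv_getD_nonneg v hv j hj'
      have hc0 := pv_getD_nonneg v hv (j + 1) (by omega)
      have hm3 := min_choice (v.getD (j - 1) 0) (v.getD j 0)
      have hm4 := min_choice (min (v.getD (j - 1) 0) (v.getD j 0)) (v.getD (j + 1) 0)
      split_ifs with hc <;> rcases hm3 with hm3 | hm3 <;> rcases hm4 with hm4 | hm4 <;> omega

lemma pvZ_step_le (v : List Int) (hv : pvNN v) (hn : 3 ≤ v.length) (i : Nat)
    (hi : i < v.length) : pvZ (meltStep v) i ≤ max 0 (pvZ v i - 1) := by
  have hfle : ∀ j, j < v.length → pvZ (meltStep v) i ≤ (Nat.dist i j : Int) + pvStepF v j := by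
    intro j hj
    rw [pvZw v hn i]
    exact (PySem.List.foldl_min_le _ _).2 _ (List.mem_map_of_mem (List.mem_range.mpr hj))
  by_cases hz : pvZ v i ≤ 0
  · have hz0 : pvZ v i = 0 := le_antisymm hz (pvZ_nonneg v hv i hi)
    have hvi : v.getD i 0 = 0 := (pvZ_eq_zero_iff v hv i hi).mp hz0
    have hwi : pvStepF v i = 0 := by
      by_cases hb : i = 0 ∨ i = v.length - 1
      · exact pv_stepF_boundary v i hb
      · rw [pvStepF_interior v i hb]
        have h1 := pv_getD_nonneg v hv (i - 1) (by omega)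
        have h3 := pv_getD_nonneg v hv (i + 1) (by omega)
        split_ifs with hc <;> omega
    have := hfle i hi
    rw [hwi, Nat.dist_eq_zero rfl] at this
    omega
  · -- pvZ v i ≥ 1: exhibit a term one smaller
    rcases PySem.List.foldl_min_mem ((List.range v.length).map (pvTerm v i))
        (min ((i : Int) + 1) ((v.length : Int) - (i : Int))) with hc | hc
    · -- Z v i hits the boundary distance
      rw [← pvZ] at hc
      by_cases hside : (i : Int) + 1 ≤ (v.length : Int) - i
      · have h0 := hfle 0 (by omega)
        rw [pv_stepF_boundary v 0 (Or.inl rfl)] at h0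
        have hd : Nat.dist i 0 = i := by simp [Nat.dist]
        rw [hd] at h0
        omega
      · have h0 := hfle (v.length - 1) (by omega)
        rw [pv_stepF_boundary v (v.length - 1) (Or.inr rfl)] at h0
        have hd : Nat.dist i (v.length - 1) = v.length - 1 - i := by simp [Nat.dist]; omega
        rw [hd] at h0
        omega
    · rw [← pvZ] at hc
      obtain ⟨j, hj, hjeq⟩ := List.mem_map.mp hc
      have hj' := List.mem_range.mp hj
      unfold pvTerm at hjeq
      by_cases hvj : v.getD j 0 = 0
      · -- a dead cell: step one position towards i, it is dead after the sweep
        have hij : i ≠ j := by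
          intro h; subst h
          rw [hvj] at hjeq
          have : Nat.dist i i = 0 := Nat.dist_eq_zero rfl
          omega
        set j' : Nat := if j ≤ i then j + 1 else j - 1 with hj'def
        have hj'lt : j' < v.length := by
          rw [hj'def]; split_ifs <;> omega
        have hdd : Nat.dist i j' + 1 = Nat.dist i j := by
          rw [hj'def]; split_ifs <;> simp [Nat.dist] <;> omega
        have hwj' : pvStepF v j' = 0 := by
          by_cases hb : j' = 0 ∨ j' = v.length - 1
          · exact pv_stepF_boundary v j' hb
          · rw [pvStepF_interior v j' hb]
            have h1 := pv_getD_nonneg v hv (j' - 1) (by omega)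
            have h2 := pv_getD_nonneg v hv j' hj'lt
            have h3 := pv_getD_nonneg v hv (j' + 1) (by omega)
            have hnb : v.getD (j' - 1) 0 = v.getD j 0 ∨ v.getD (j' + 1) 0 = v.getD j 0 := by
              rw [hj'def]
              split_ifs with hcase
              · left; congr 1; try omega
              · right; congr 1; try omega
            rcases hnb with hnb | hnb <;> rw [hvj] at hnb <;> split_ifs with hc2 <;> try omega
        have := hfle j' hj'lt
        rw [hwj'] at this
        omega
      · have hvjpos : 0 < v.getD j 0 :=
          lt_of_le_of_ne (pv_getD_nonneg v hv j hj') (Ne.symm hvj)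
        by_cases hb : j = 0 ∨ j = v.length - 1
        · have := hfle j hj'
          rw [pv_stepF_boundary v j hb] at this
          omega
        · have := hfle j hj'
          rw [pvStepF_interior v j hb] at this
          have ha0 := pv_getD_nonneg v hv (j - 1) (by omega)
          have hc0 := pv_getD_nonneg v hv (j + 1) (by omega)
          split_ifs at this with hc2 <;> omega

lemma pvZ_step (v : List Int) (hv : pvNN v) (hn : 3 ≤ v.length) (i : Nat) (hi : i < v.length) :
    pvZ (meltStep v) i = max 0 (pvZ v i - 1) :=
  le_antisymm (pvZ_step_le v hv hn i hi) (pvZ_step_ge v hv hn i hi)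

lemma pvMaxZ_nonneg (v : List Int) : 0 ≤ pvMaxZ v :=
  (PySem.List.le_foldl_max _ _).1

lemma pv_foldl_max_le {c a : Int} {l : List Int} (h1 : a ≤ c) (h2 : ∀ b ∈ l, b ≤ c) :
    l.foldl max a ≤ c := by
  induction l generalizing a with
  | nil => exact h1
  | cons x xs ih =>
    exact ih (max_le h1 (h2 x (by simp))) (fun b hb => h2 b (by simp [hb]))

lemma pvZ_le_maxZ (v : List Int) (i : Nat) (hi : i < v.length) : pvZ v i ≤ pvMaxZ v :=
  (PySem.List.le_foldl_max _ _).2 _ (List.mem_map_of_mem (List.mem_range.mpr hi))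

lemma pvMaxZ_step (v : List Int) (hv : pvNN v) (hn : 3 ≤ v.length) :
    pvMaxZ (meltStep v) = max 0 (pvMaxZ v - 1) := by
  have hmap : (List.range (meltStep v).length).map (pvZ (meltStep v))
      = (List.range v.length).map (fun i => max 0 (pvZ v i - 1)) := by
    rw [pv_meltStep_length]
    apply List.map_congr_left
    intro i hi
    exact pvZ_step v hv hn i (List.mem_range.mp hi)
  rw [pvMaxZ, hmap]
  apply le_antisymm
  · apply pv_foldl_max_le (by omega)
    intro b hb
    obtain ⟨i, hi, rfl⟩ := List.mem_map.mp hb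
    have := pvZ_le_maxZ v i (List.mem_range.mp hi)
    show max 0 (pvZ v i - 1) ≤ max 0 (pvMaxZ v - 1)
    omega
  · rcases PySem.List.foldl_max_mem ((List.range v.length).map (pvZ v)) 0 with hc | hc <;>
      rw [← pvMaxZ] at hc
    · have h0 : (0 : Int) ≤ ((List.range v.length).map
          (fun i => max 0 (pvZ v i - 1))).foldl max 0 := (PySem.List.le_foldl_max _ _).1
      omega
    · obtain ⟨i, hi, hieq⟩ := List.mem_map.mp hc
      have hel : max 0 (pvZ v i - 1) ≤ ((List.range v.length).map
          (fun i => max 0 (pvZ v i - 1))).foldl max 0 :=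
        (PySem.List.le_foldl_max _ _).2 _ (List.mem_map_of_mem hi)
      omega

lemma pv_allzero_iff (v : List Int) (hv : pvNN v) :
    (∀ x ∈ v, x = 0) ↔ pvMaxZ v ≤ 0 := by
  constructor
  · intro h
    apply pv_foldl_max_le le_rfl
    intro b hb
    obtain ⟨i, hi, rfl⟩ := List.mem_map.mp hb
    have hi' := List.mem_range.mp hi
    show pvZ v i ≤ 0
    have ht := pvZ_le_term v i i hi'
    unfold pvTerm at ht
    rw [Nat.dist_eq_zero rfl] at ht
    have hg : v.getD i 0 = 0 := by
      rw [List.getD_eq_getElem _ _ hi']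
      exact h _ (List.getElem_mem hi')
    omega
  · intro h x hx
    obtain ⟨i, hi, rfl⟩ := List.mem_iff_getElem.mp hx
    have hz0 : pvZ v i = 0 :=
      le_antisymm (le_trans (pvZ_le_maxZ v i hi) h) (pvZ_nonneg v hv i hi)
    have := (pvZ_eq_zero_iff v hv i hi).mp hz0
    rwa [List.getD_eq_getElem _ _ hi] at this

lemma pv_filter_zero (h : List Int) :
    (((h.filter (fun c => c ≠ 0)).length : Int) = 0) ↔ ∀ x ∈ h, x = 0 := by
  simp [List.length_eq_zero_iff, List.filter_eq_nil_iff]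

-- ----- the loop counts down pvMaxZ -----
lemma pv_meltLoop_succ (fuel : Nat) (v : List Int) (c : Int) :
    meltLoop (fuel + 1) v c =
      if ((((meltStep v).filter (fun c => c ≠ 0)).length : Nat) : Int) = 0 then c + 1
      else meltLoop fuel (meltStep v) (c + 1) := rfl

lemma pv_loop (fuel : Nat) : ∀ (v : List Int) (c : Int), pvNN v → 3 ≤ v.length →
    (pvMaxZ v).toNat ≤ fuel → meltLoop (fuel + 1) v c = c + max 1 (pvMaxZ v) := by
  induction fuel with
  | zero =>
    intro v c hv hn hf
    have hmz : pvMaxZ v = 0 := le_antisymm (by omega) (pvMaxZ_nonneg v)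
    have hall : ∀ x ∈ meltStep v, x = 0 :=
      (pv_allzero_iff _ (pv_meltStep_nonneg v hv hn)).mpr
        (by rw [pvMaxZ_step v hv hn]; omega)
    rw [pv_meltLoop_succ, if_pos ((pv_filter_zero _).mpr hall)]
    omega
  | succ fuel ih =>
    intro v c hv hn hf
    rw [pv_meltLoop_succ]
    by_cases hstop : pvMaxZ v ≤ 1
    · have hall : ∀ x ∈ meltStep v, x = 0 :=
        (pv_allzero_iff _ (pv_meltStep_nonneg v hv hn)).mpr
          (by rw [pvMaxZ_step v hv hn]; omega)
      rw [if_pos ((pv_filter_zero _).mpr hall)]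
      have := pvMaxZ_nonneg v
      omega
    · have hnz : ¬ (((((meltStep v).filter (fun c => c ≠ 0)).length : Nat) : Int) = 0) := by
        intro hzero
        have hall := (pv_filter_zero _).mp hzero
        have := (pv_allzero_iff _ (pv_meltStep_nonneg v hv hn)).mp hall
        rw [pvMaxZ_step v hv hn] at this
        omega
      rw [if_neg hnz]
      have hlen : 3 ≤ (meltStep v).length := by rw [pv_meltStep_length]; exact hn
      have hms := pvMaxZ_step v hv hn
      rw [ih (meltStep v) (c + 1) (pv_meltStep_nonneg v hv hn) hlen (by omega), hms]
      omega

lemma pv_melt_hist_eq (v : List Int) (hv : pvNN v) (hn : 3 ≤ v.length) :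
    melt_hist v = max 1 (pvMaxZ v) := by
  unfold melt_hist
  rw [if_neg (by omega)]
  have hmb : pvMaxZ v ≤ (v.length : Int) := by
    apply pv_foldl_max_le (by positivity)
    intro b hb
    obtain ⟨i, hi, rfl⟩ := List.mem_map.mp hb
    have hi' := List.mem_range.mp hi
    have := pvZ_le_init v i
    show pvZ v i ≤ (v.length : Int)
    simp only [le_min_iff] at this
    omega
  rw [pv_loop v.length v 0 hv hn (by omega)]
  omega

-- ----- B side: scans -----
def pvL (v : List Int) : Int := v.foldl (fun l x => min (l + 1) x) 0
def pvR (v : List Int) : Int := v.foldr (fun x r => min (r + 1) x) 0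

lemma pvL_append (p : List Int) (x : Int) : pvL (p ++ [x]) = min (pvL p + 1) x := by
  simp [pvL, List.foldl_append]

lemma pv_getD_take (v : List Int) (i j : Nat) (hj : j < i + 1) (h : j < v.length) :
    (v.take (i + 1)).getD j 0 = v.getD j 0 := by
  rw [List.getD_eq_getElem _ _ (by simp; omega), List.getD_eq_getElem _ _ h, List.getElem_take]

lemma pv_getD_drop (v : List Int) (i j : Nat) (h : i + j < v.length) :
    (v.drop i).getD j 0 = v.getD (i + j) 0 := by
  rw [List.getD_eq_getElem _ _ (by simp; omega), List.getD_eq_getElem _ _ h, List.getElem_drop]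

lemma pvL_closed (p : List Int) :
    pvL p = ((List.range p.length).map
        (fun j => ((p.length - 1 - j : Nat) : Int) + p.getD j 0)).foldl min (p.length : Int) := by
  induction p using List.reverseRecOn with
  | nil => rfl
  | append_singleton p x ih =>
    rw [pvL_append, ih]
    have hlen : (p ++ [x]).length = p.length + 1 := by simp
    rw [hlen, List.range_succ, List.map_append, List.foldl_append]
    have hmap : (List.range p.length).map
        (fun j => ((p.length + 1 - 1 - j : Nat) : Int) + (p ++ [x]).getD j 0)
        = ((List.range p.length).map
            (fun j => ((p.length - 1 - j : Nat) : Int) + p.getD j 0)).map (· + 1) := by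
      rw [List.map_map]
      apply List.map_congr_left
      intro j hj
      have hj' := List.mem_range.mp hj
      have hg : (p ++ [x]).getD j 0 = p.getD j 0 := by
        rw [List.getD_eq_getElem _ _ (by simp; omega), List.getElem_append_left hj',
          ← List.getD_eq_getElem _ _ hj']
      have hc : (p.length + 1 - 1 - j : Nat) = (p.length - 1 - j) + 1 := by omega
      simp only [Function.comp_apply, hg, hc]
      push_cast
      ring
    have hg2 : (p ++ [x]).getD p.length 0 = x := by
      rw [List.getD_eq_getElem _ _ (by rw [hlen]; omega), List.getElem_concat_length]
      rfl
    simp only [List.map_cons, List.map_nil, List.foldl_cons, List.foldl_nil, hmap, hg2]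
    rw [show ((p.length + 1 : Nat) : Int) = (p.length : Int) + 1 by push_cast; ring,
      pv_foldl_min_add_one]
    simp

lemma pvR_cons (x : Int) (s : List Int) : pvR (x :: s) = min (pvR s + 1) x := rfl

lemma pvR_closed (s : List Int) :
    pvR s = ((List.range s.length).map
        (fun (j : Nat) => (j : Int) + s.getD j 0)).foldl min (s.length : Int) := by
  induction s with
  | nil => rfl
  | cons x s ih =>
    rw [pvR_cons, ih]
    rw [show (x :: s).length = s.length + 1 from rfl, List.range_succ_eq_map, List.map_cons,
      List.map_map]
    have hmap : (List.range s.length).map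
        ((fun (j : Nat) => (j : Int) + (x :: s).getD j 0) ∘ Nat.succ)
        = ((List.range s.length).map (fun (j : Nat) => (j : Int) + s.getD j 0)).map (· + 1) := by
      rw [List.map_map]
      apply List.map_congr_left
      intro j hj
      simp only [Function.comp_apply, List.getD_cons_succ]
      push_cast
      ring
    simp only [List.foldl_cons, hmap, Nat.cast_zero, List.getD_cons_zero, zero_add]
    rw [show ((s.length + 1 : Nat) : Int) = (s.length : Int) + 1 by push_cast; ring,
      pv_foldl_min_min, pv_foldl_min_add_one]

lemma pv_min_LR (v : List Int) (i : Nat) (hi : i < v.length) :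
    min (pvL (v.take (i + 1))) (pvR (v.drop i)) = pvZ v i := by
  have hLlen : (v.take (i + 1)).length = i + 1 := by simp; omega
  have hRlen : (v.drop i).length = v.length - i := by simp
  apply le_antisymm
  · -- min L R is a lower bound witness for every term of Z
    apply pv_le_foldl_min
    · apply le_min
      · have := (PySem.List.foldl_min_le ((List.range (v.take (i + 1)).length).map
            (fun j => (((v.take (i + 1)).length - 1 - j : Nat) : Int) + (v.take (i + 1)).getD j 0))
            ((v.take (i + 1)).length : Int)).1
        rw [← pvL_closed] at this
        rw [hLlen] at this
        omega
      · have := (PySem.List.foldl_min_le ((List.range (v.drop i).length).map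
            (fun (j : Nat) => (j : Int) + (v.drop i).getD j 0)) ((v.drop i).length : Int)).1
        rw [← pvR_closed] at this
        rw [hRlen] at this
        omega
    · intro b hb
      obtain ⟨j, hj, rfl⟩ := List.mem_map.mp hb
      have hj' := List.mem_range.mp hj
      show min (pvL (v.take (i + 1))) (pvR (v.drop i)) ≤ pvTerm v i j
      unfold pvTerm
      rcases le_total j i with hji | hij
      · -- use the left scan's term at j
        have hmem : (((v.take (i + 1)).length - 1 - j : Nat) : Int) + (v.take (i + 1)).getD j 0
            ∈ (List.range (v.take (i + 1)).length).map
              (fun j => (((v.take (i + 1)).length - 1 - j : Nat) : Int) + (v.take (i + 1)).getD j 0) :=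
          List.mem_map_of_mem (List.mem_range.mpr (by omega))
        have hle := (PySem.List.foldl_min_le ((List.range (v.take (i + 1)).length).map
            (fun j => (((v.take (i + 1)).length - 1 - j : Nat) : Int) + (v.take (i + 1)).getD j 0))
            ((v.take (i + 1)).length : Int)).2 _ hmem
        rw [← pvL_closed] at hle
        rw [pv_getD_take v i j (by omega) (by omega)] at hle
        have hd : Nat.dist i j = (v.take (i + 1)).length - 1 - j := by
          rw [hLlen]; simp [Nat.dist]; omega
        rw [hd]
        omega
      · -- use the right scan's term at j - i
        have hmem : ((j - i : Nat) : Int) + (v.drop i).getD (j - i) 0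
            ∈ (List.range (v.drop i).length).map
              (fun (t : Nat) => (t : Int) + (v.drop i).getD t 0) :=
          List.mem_map_of_mem (List.mem_range.mpr (by omega))
        have hle := (PySem.List.foldl_min_le ((List.range (v.drop i).length).map
            (fun (t : Nat) => (t : Int) + (v.drop i).getD t 0))
            ((v.drop i).length : Int)).2 _ hmem
        rw [← pvR_closed] at hle
        rw [pv_getD_drop v i (j - i) (by omega), show i + (j - i) = j by omega] at hle
        have hd : Nat.dist i j = j - i := by simp [Nat.dist]; omega
        rw [hd]
        omega
  · -- Z is a lower bound for both scans
    apply le_min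
    · rw [pvL_closed]
      apply pv_le_foldl_min
      · have := pvZ_le_init v i
        rw [hLlen]
        simp only [le_min_iff] at this
        omega
      · intro b hb
        obtain ⟨j, hj, rfl⟩ := List.mem_map.mp hb
        have hj' := List.mem_range.mp hj
        rw [hLlen] at hj'
        have ht := pvZ_le_term v i j (by omega)
        unfold pvTerm at ht
        rw [pv_getD_take v i j (by omega) (by omega)]
        have hd : Nat.dist i j ≤ (v.take (i + 1)).length - 1 - j := by
          rw [hLlen]; simp [Nat.dist]; omega
        omega
    · rw [pvR_closed]
      apply pv_le_foldl_min
      · have := pvZ_le_init v i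
        rw [hRlen]
        simp only [le_min_iff] at this
        omega
      · intro b hb
        obtain ⟨t, ht', rfl⟩ := List.mem_map.mp hb
        have ht'' := List.mem_range.mp ht'
        rw [hRlen] at ht''
        have ht := pvZ_le_term v i (i + t) (by omega)
        unfold pvTerm at ht
        rw [pv_getD_drop v i t (by omega)]
        have hd : Nat.dist i (i + t) ≤ t := by simp [Nat.dist]
        omega

lemma pv_forward (v : List Int) :
    v.foldl (fun (p : List Int × Int) x =>
        let left := min (p.2 + 1) x
        (p.1 ++ [left], left)) ([], 0)
      = ((List.range v.length).map (fun i => pvL (v.take (i + 1))), pvL v) := by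
  induction v using List.reverseRecOn with
  | nil => rfl
  | append_singleton v x ih =>
    rw [List.foldl_append, ih]
    have hlen : (v ++ [x]).length = v.length + 1 := by simp
    rw [hlen, List.range_succ, List.map_append]
    have hmap : (List.range v.length).map (fun i => pvL ((v ++ [x]).take (i + 1)))
        = (List.range v.length).map (fun i => pvL (v.take (i + 1))) := by
      apply List.map_congr_left
      intro i hi
      rw [List.take_append_of_le_length (by have := List.mem_range.mp hi; omega)]
    have htake : (v ++ [x]).take (v.length + 1) = v ++ [x] := by
      apply List.take_of_length_le
      omega
    simp only [hmap, List.map_cons, List.map_nil, htake, pvL_append]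
    rfl

lemma pv_backward (v d : List Int)
    (hd : ∀ (i : Nat), i < v.length →
      PySem.List.pyGetD d (i : Int) 0 = pvL (v.take (i + 1))) :
    ∀ (m : Nat), m ≤ v.length → ∀ (b : Int),
      ((List.range m).reverse).foldl (fun (p : Int × Int) (i : Nat) =>
          (min (p.1 + 1) (PySem.List.pyGetD v (i : Int) 0),
           max p.2 (min (PySem.List.pyGetD d (i : Int) 0)
             (min (p.1 + 1) (PySem.List.pyGetD v (i : Int) 0)))))
        (pvR (v.drop m), b)
      = (pvR v, ((List.range m).reverse.map
          (fun i => min (pvL (v.take (i + 1))) (pvR (v.drop i)))).foldl max b) := by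
  intro m
  induction m with
  | zero => intro _ b; simp
  | succ m ih =>
    intro hm b
    rw [List.range_succ, List.reverse_append, List.reverse_singleton, List.singleton_append,
      List.foldl_cons, List.map_cons, List.foldl_cons]
    have hr : min (pvR (v.drop (m + 1)) + 1) (PySem.List.pyGetD v (m : Int) 0)
        = pvR (v.drop m) := by
      rw [PySem.List.pyGetD_natCast, List.drop_eq_getElem_cons (by omega : m < v.length),
        pvR_cons, List.getD_eq_getElem _ _ (by omega : m < v.length)]
    have hdm : PySem.List.pyGetD d (m : Int) 0 = pvL (v.take (m + 1)) := hd m (by omega)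
    simp only [hr, hdm]
    exact ih (by omega) (max b (min (pvL (v.take (m + 1))) (pvR (v.drop m))))

lemma pv_melt_hist_alt_eq (v : List Int) (hn : 3 ≤ v.length) :
    melt_hist_alt v = max 1 (pvMaxZ v) := by
  unfold melt_hist_alt
  rw [if_neg (by omega : ¬ ((v.length : Int) ≤ 2))]
  show max ((((List.range v.length).reverse).foldl (fun (p : Int × Int) (i : Nat) =>
      (min (p.1 + 1) (PySem.List.pyGetD v (i : Int) 0),
       max p.2 (min (PySem.List.pyGetD ((v.foldl (fun (p : List Int × Int) x =>
           let left := min (p.2 + 1) x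
           (p.1 ++ [left], left)) ([], 0)).1) (i : Int) 0)
         (min (p.1 + 1) (PySem.List.pyGetD v (i : Int) 0)))))
    ((0 : Int), (0 : Int))).2) 1 = max 1 (pvMaxZ v)
  have hd : ∀ (i : Nat), i < v.length →
      PySem.List.pyGetD ((v.foldl (fun (p : List Int × Int) x =>
          let left := min (p.2 + 1) x
          (p.1 ++ [left], left)) ([], 0)).1) (i : Int) 0 = pvL (v.take (i + 1)) := by
    intro i hi
    rw [pv_forward, PySem.List.pyGetD_natCast]
    exact PySem.List.getD_map_range _ _ _ _ hi
  have hb := pv_backward v _ hd v.length le_rfl 0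
  rw [List.drop_length, show pvR ([] : List Int) = 0 from rfl] at hb
  rw [hb]
  have hbest : ((List.range v.length).reverse.map
      (fun i => min (pvL (v.take (i + 1))) (pvR (v.drop i)))).foldl max 0 = pvMaxZ v := by
    apply le_antisymm
    · apply pv_foldl_max_le (pvMaxZ_nonneg v)
      intro b hb'
      obtain ⟨i, hi, rfl⟩ := List.mem_map.mp hb'
      have hi' : i < v.length := List.mem_range.mp (List.mem_reverse.mp hi)
      show min (pvL (v.take (i + 1))) (pvR (v.drop i)) ≤ pvMaxZ v
      rw [pv_min_LR v i hi']
      exact pvZ_le_maxZ v i hi'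
    · apply pv_foldl_max_le (PySem.List.le_foldl_max _ _).1
      intro b hb'
      obtain ⟨i, hi, rfl⟩ := List.mem_map.mp hb'
      have hi' : i < v.length := List.mem_range.mp hi
      show pvZ v i ≤ _
      rw [← pv_min_LR v i hi']
      exact (PySem.List.le_foldl_max _ _).2 _
        (List.mem_map_of_mem (List.mem_reverse.mpr (List.mem_range.mpr hi')))
  rw [hbest]
  omega

-- ===== VERDICT (by name: the statement is the Claim_ definition above) =====
theorem melt_hist_spec : Claim_equal_melt_hist := by
  intro hist _ hpre
  obtain ⟨hne, hcase⟩ := hpre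
  unfold Spec_melt_hist
  by_cases h3 : 3 ≤ hist.length
  · have hnn : pvNN hist := by
      rcases hcase with hle | hnn
      · omega
      · exact hnn
    rw [pv_melt_hist_eq hist hnn h3, pv_melt_hist_alt_eq hist h3]
  · -- length 1 or 2: both return 1
    rcases hist with _ | ⟨a, _ | ⟨b, _ | ⟨c, t⟩⟩⟩
    · exact absurd rfl hne
    · simp [melt_hist, melt_hist_alt]
    · simp [melt_hist, melt_hist_alt]
    · exfalso; apply h3; simp
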